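-- pv_equiv track=rewrite | github.com/Phrankles/Chubbymon | source/lib/dmcomm/ic_encoding.py | redundancy_bits
-- ===== SOURCE A (Python) =====
-- def redundancy_bits(x):
-- 	"Calculates the 16 redundancy bits for 16 bits of data."
-- 	result = 0x79B4
-- 	mask = 0x19D8
-- 	for i in range(16):
-- 		if x & 1:
-- 			result ^= mask
-- 		x >>= 1
-- 		mask <<= 1
-- 		if mask >= 0x10000:
-- 			mask ^= 0x10811
-- 	return result
-- ===== SOURCE B (Python) =====
-- # Table-driven: two precomputed 256-entry XOR-contribution tables (one per input byte)
-- # replace the 16-step bit loop; result = 0x79B4 ^ TBL_LO[low byte] ^ TBL_HI[high byte].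
--
-- _TBL_LO = [0x0, 0x19d8, 0x33b0, 0x2a68, 0x6760, 0x7eb8, 0x54d0, 0x4d08, 0xcec0, 0xd718, 0xfd70, 0xe4a8, 0xa9a0, 0xb078, 0x9a10, 0x83c8, 0x9591, 0x8c49, 0xa621, 0xbff9, 0xf2f1, 0xeb29, 0xc141, 0xd899, 0x5b51, 0x4289, 0x68e1, 0x7139, 0x3c31, 0x25e9, 0xf81, 0x1659, 0x2333, 0x3aeb, 0x1083, 0x95b, 0x4453, 0x5d8b, 0x77e3, 0x6e3b, 0xedf3, 0xf42b, 0xde43, 0xc79b, 0x8a93, 0x934b, 0xb923, 0xa0fb, 0xb6a2, 0xaf7a, 0x8512, 0x9cca, 0xd1c2, 0xc81a, 0xe272, 0xfbaa, 0x7862, 0x61ba, 0x4bd2, 0x520a, 0x1f02, 0x6da, 0x2cb2, 0x356a, 0x4666, 0x5fbe, 0x75d6, 0x6c0e, 0x2106, 0x38de, 0x12b6, 0xb6e, 0x88a6, 0x917e, 0xbb16, 0xa2ce, 0xefc6, 0xf61e, 0xdc76, 0xc5ae, 0xd3f7, 0xca2f, 0xe047, 0xf99f, 0xb497, 0xad4f,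 0x8727, 0x9eff, 0x1d37, 0x4ef, 0x2e87, 0x375f, 0x7a57, 0x638f, 0x49e7, 0x503f, 0x6555, 0x7c8d, 0x56e5, 0x4f3d, 0x235, 0x1bed, 0x3185, 0x285d, 0xab95, 0xb24d, 0x9825, 0x81fd, 0xccf5, 0xd52d, 0xff45, 0xe69d, 0xf0c4, 0xe91c, 0xc374, 0xdaac, 0x97a4, 0x8e7c, 0xa414, 0xbdcc, 0x3e04, 0x27dc, 0xdb4, 0x146c, 0x5964, 0x40bc, 0x6ad4, 0x730c, 0x8ccc, 0x9514, 0xbf7c, 0xa6a4, 0xebac, 0xf274, 0xd81c, 0xc1c4, 0x420c, 0x5bd4, 0x71bc, 0x6864, 0x256c, 0x3cb4, 0x16dc, 0xf04, 0x195d, 0x85, 0x2aed, 0x3335, 0x7e3d, 0x67e5, 0x4d8d, 0x5455, 0xd79d, 0xce45, 0xe42d, 0xfdf5, 0xb0fd, 0xa925, 0x834d, 0x9a95, 0xafff, 0xb627, 0x9c4f, 0x8597, 0xc89f, 0xd147, 0xfb2f, 0xe2f7, 0x613f, 0x78e7, 0x528f, 0x4b57, 0x65f, 0x1f87, 0x35ef,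 0x2c37, 0x3a6e, 0x23b6, 0x9de, 0x1006, 0x5d0e, 0x44d6, 0x6ebe, 0x7766, 0xf4ae, 0xed76, 0xc71e, 0xdec6, 0x93ce, 0x8a16, 0xa07e, 0xb9a6, 0xcaaa, 0xd372, 0xf91a, 0xe0c2, 0xadca, 0xb412, 0x9e7a, 0x87a2, 0x46a, 0x1db2, 0x37da, 0x2e02, 0x630a, 0x7ad2, 0x50ba, 0x4962, 0x5f3b, 0x46e3, 0x6c8b, 0x7553, 0x385b, 0x2183, 0xbeb, 0x1233, 0x91fb, 0x8823, 0xa24b, 0xbb93, 0xf69b, 0xef43, 0xc52b, 0xdcf3, 0xe999, 0xf041, 0xda29, 0xc3f1, 0x8ef9, 0x9721, 0xbd49, 0xa491, 0x2759, 0x3e81, 0x14e9, 0xd31, 0x4039, 0x59e1, 0x7389, 0x6a51, 0x7c08, 0x65d0, 0x4fb8, 0x5660, 0x1b68, 0x2b0, 0x28d8, 0x3100, 0xb2c8, 0xab10, 0x8178, 0x98a0, 0xd5a8, 0xcc70, 0xe618, 0xffc0]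
--
-- _TBL_HI = [0x0, 0x1189, 0x2312, 0x329b, 0x4624, 0x57ad, 0x6536, 0x74bf, 0x8c48, 0x9dc1, 0xaf5a, 0xbed3, 0xca6c, 0xdbe5, 0xe97e, 0xf8f7, 0x1081, 0x108, 0x3393, 0x221a, 0x56a5, 0x472c, 0x75b7, 0x643e, 0x9cc9, 0x8d40, 0xbfdb, 0xae52, 0xdaed, 0xcb64, 0xf9ff, 0xe876, 0x2102, 0x308b, 0x210, 0x1399, 0x6726, 0x76af, 0x4434, 0x55bd, 0xad4a, 0xbcc3, 0x8e58, 0x9fd1, 0xeb6e, 0xfae7, 0xc87c, 0xd9f5, 0x3183, 0x200a, 0x1291, 0x318, 0x77a7, 0x662e, 0x54b5, 0x453c, 0xbdcb, 0xac42, 0x9ed9, 0x8f50, 0xfbef, 0xea66, 0xd8fd, 0xc974, 0x4204, 0x538d, 0x6116, 0x709f, 0x420, 0x15a9, 0x2732, 0x36bb, 0xce4c, 0xdfc5, 0xed5e, 0xfcd7, 0x8868, 0x99e1, 0xab7a, 0xbaf3, 0x5285, 0x430c, 0x7197, 0x601e, 0x14a1, 0x528, 0x37b3, 0x263a, 0xdecd,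 0xcf44, 0xfddf, 0xec56, 0x98e9, 0x8960, 0xbbfb, 0xaa72, 0x6306, 0x728f, 0x4014, 0x519d, 0x2522, 0x34ab, 0x630, 0x17b9, 0xef4e, 0xfec7, 0xcc5c, 0xddd5, 0xa96a, 0xb8e3, 0x8a78, 0x9bf1, 0x7387, 0x620e, 0x5095, 0x411c, 0x35a3, 0x242a, 0x16b1, 0x738, 0xffcf, 0xee46, 0xdcdd, 0xcd54, 0xb9eb, 0xa862, 0x9af9, 0x8b70, 0x8408, 0x9581, 0xa71a, 0xb693, 0xc22c, 0xd3a5, 0xe13e, 0xf0b7, 0x840, 0x19c9, 0x2b52, 0x3adb, 0x4e64, 0x5fed, 0x6d76, 0x7cff, 0x9489, 0x8500, 0xb79b, 0xa612, 0xd2ad, 0xc324, 0xf1bf, 0xe036, 0x18c1, 0x948, 0x3bd3, 0x2a5a, 0x5ee5, 0x4f6c, 0x7df7, 0x6c7e, 0xa50a, 0xb483, 0x8618, 0x9791, 0xe32e, 0xf2a7, 0xc03c, 0xd1b5, 0x2942, 0x38cb, 0xa50, 0x1bd9, 0x6f66, 0x7eef, 0x4c74, 0x5dfd, 0xb58b,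 0xa402, 0x9699, 0x8710, 0xf3af, 0xe226, 0xd0bd, 0xc134, 0x39c3, 0x284a, 0x1ad1, 0xb58, 0x7fe7, 0x6e6e, 0x5cf5, 0x4d7c, 0xc60c, 0xd785, 0xe51e, 0xf497, 0x8028, 0x91a1, 0xa33a, 0xb2b3, 0x4a44, 0x5bcd, 0x6956, 0x78df, 0xc60, 0x1de9, 0x2f72, 0x3efb, 0xd68d, 0xc704, 0xf59f, 0xe416, 0x90a9, 0x8120, 0xb3bb, 0xa232, 0x5ac5, 0x4b4c, 0x79d7, 0x685e, 0x1ce1, 0xd68, 0x3ff3, 0x2e7a, 0xe70e, 0xf687, 0xc41c, 0xd595, 0xa12a, 0xb0a3, 0x8238, 0x93b1, 0x6b46, 0x7acf, 0x4854, 0x59dd, 0x2d62, 0x3ceb, 0xe70, 0x1ff9, 0xf78f, 0xe606, 0xd49d, 0xc514, 0xb1ab, 0xa022, 0x92b9, 0x8330, 0x7bc7, 0x6a4e, 0x58d5, 0x495c, 0x3de3, 0x2c6a, 0x1ef1, 0xf78]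
--
-- def redundancy_bits(x):
-- 	"Calculates the 16 redundancy bits for 16 bits of data."
-- 	return 0x79B4 ^ _TBL_LO[x & 0xFF] ^ _TBL_HI[(x >> 8) & 0xFF]
-- ===== Notes on version B (the rewrite author's own statement) =====
-- stated objective: faster
-- what changed: Replaced the 16-iteration per-bit loop (with its evolving mask register) by two precomputed 256-entry literal tables indexed by the low and high byte of x: result = 0x79B4 ^ TBL_LO[x & 0xFF] ^ TBL_HI[(x >> 8) & 0xFF], with no per-bit looping at runtime.
import Mathlib
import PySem

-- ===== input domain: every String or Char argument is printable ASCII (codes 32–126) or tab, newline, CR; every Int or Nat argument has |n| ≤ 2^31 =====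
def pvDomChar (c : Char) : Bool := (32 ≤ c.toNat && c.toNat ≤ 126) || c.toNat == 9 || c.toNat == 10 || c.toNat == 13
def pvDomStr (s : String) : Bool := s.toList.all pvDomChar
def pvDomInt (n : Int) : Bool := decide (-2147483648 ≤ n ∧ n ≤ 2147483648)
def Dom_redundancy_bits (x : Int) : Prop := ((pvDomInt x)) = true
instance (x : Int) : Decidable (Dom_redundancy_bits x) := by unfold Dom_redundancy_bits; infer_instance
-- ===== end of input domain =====

-- B replaces A's 16-iteration bit loop by two precomputed 256-entry XOR tables (one per input byte): constant-time, no per-bit loop.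

-- ===== PORT A =====
-- the for-loop of A, threading its state (result, x, mask); returns the final state
def loopA : Nat → Int → Int → Int → Int × Int × Int
  | 0, result, x, mask => (result, x, mask)
  | n+1, result, x, mask =>
      let result := if PySem.Int.band x 1 ≠ 0 then PySem.Int.bxor result mask else result
      let x := x >>> (1 : Nat)
      let mask := mask <<< (1 : Nat)
      let mask := if mask ≥ 0x10000 then PySem.Int.bxor mask 0x10811 else mask
      loopA n result x mask

def redundancy_bits (x : Int) : Int := (loopA 16 0x79B4 x 0x19D8).1

-- ===== PORT B =====
def tblLo : List Int := [0, 6616, 13232, 10856, 26464, 32440, 21712, 19720, 52928, 55064, 64880, 58536, 43424, 45176, 39440, 33736, 38289, 35913, 42529, 49145, 62193, 60201, 49473, 55449, 23377, 17033, 26849, 28985, 15409, 9705, 3969, 5721, 9011, 15083, 4227, 2395, 17491, 23947, 30691, 28219, 60915, 62507, 56899, 51099, 35475, 37707, 47395, 41211, 46754, 44922, 34066, 40138, 53698, 51226, 57970, 64426, 30818, 25018, 19410, 21002, 7938, 1754, 11442, 13674, 18022, 24510, 30166, 27662, 8454, 14558, 4790, 2926, 34982, 37246, 47894, 41678, 61382,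 63006, 56438, 50606, 54263, 51759, 57415, 63903, 46231, 44367, 34599, 40703, 7479, 1263, 11911, 14175, 31319, 25487, 18919, 20543, 25941, 31885, 22245, 20285, 565, 7149, 12677, 10333, 43925, 45645, 38949, 33277, 52469, 54573, 65349, 59037, 61636, 59676, 50036, 55980, 38820, 36476, 42004, 48588, 15876, 10204, 3508, 5228, 22884, 16572, 27348, 29452, 36044, 38164, 49020, 42660, 60332, 62068, 55324, 49604, 16908, 23508, 29116, 26724, 9580, 15540, 5852, 3844, 6493, 133, 10989, 13109, 32317, 26597, 19853, 21589, 55197, 52805, 58413, 65013, 45309, 43301, 33613, 39573, 45055, 46631, 40015, 34199, 51359, 53575, 64303, 58103, 24895, 30951, 21135, 19287, 1631, 8071, 13807, 11319, 14958, 9142, 2526, 4102, 23822, 17622, 28350, 30566, 62638, 60790, 50974, 57030, 37838, 35350, 41086, 47526, 51882, 54130, 63770, 57538, 44490, 46098, 40570, 34722, 1130, 7602, 14298, 11778, 25354, 31442, 20666, 18786, 24379, 18147, 27787, 30035, 14427, 8579, 3051, 4659, 37371, 34851, 41547, 48019, 63131, 61251, 50475, 56563, 59801, 61505, 55849, 50161,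 36601, 38689, 48457, 42129, 10073, 16001, 5353, 3377, 16441, 23009, 29577, 27217, 31752, 26064, 20408, 22112, 7016, 688, 10456, 12544, 45768, 43792, 33144, 39072, 54696, 52336, 58904, 65472]

def tblHi : List Int := [0, 4489, 8978, 12955, 17956, 22445, 25910, 29887, 35912, 40385, 44890, 48851, 51820, 56293, 59774, 63735, 4225, 264, 13203, 8730, 22181, 18220, 30135, 25662, 40137, 36160, 49115, 44626, 56045, 52068, 63999, 59510, 8450, 12427, 528, 5017, 26406, 30383, 17460, 21949, 44362, 48323, 36440, 40913, 60270, 64231, 51324, 55797, 12675, 8202, 4753, 792, 30631, 26158, 21685, 17724, 48587, 44098, 40665, 36688, 64495, 60006, 55549, 51572, 16900, 21389, 24854, 28831, 1056, 5545, 10034, 14011, 52812, 57285, 60766, 64727, 34920, 39393, 43898, 47859, 21125, 17164, 29079, 24606, 5281, 1320, 14259, 9786, 57037, 53060, 64991, 60502, 39145, 35168, 48123, 43634, 25350, 29327, 16404, 20893, 9506, 13483, 1584, 6073, 61262, 65223, 52316, 56789, 43370, 47331, 35448, 39921, 29575, 25102, 20629, 16668, 13731, 9258, 5809, 1848, 65487,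 60998, 56541, 52564, 47595, 43106, 39673, 35696, 33800, 38273, 42778, 46739, 49708, 54181, 57662, 61623, 2112, 6601, 11090, 15067, 20068, 24557, 28022, 31999, 38025, 34048, 47003, 42514, 53933, 49956, 61887, 57398, 6337, 2376, 15315, 10842, 24293, 20332, 32247, 27774, 42250, 46211, 34328, 38801, 58158, 62119, 49212, 53685, 10562, 14539, 2640, 7129, 28518, 32495, 19572, 24061, 46475, 41986, 38553, 34576, 62383, 57894, 53437, 49460, 14787, 10314, 6865, 2904, 32743, 28270, 23797, 19836, 50700, 55173, 58654, 62615, 32808, 37281, 41786, 45747, 19012, 23501, 26966, 30943, 3168, 7657, 12146, 16123, 54925, 50948, 62879, 58390, 37033, 33056, 46011, 41522, 23237, 19276, 31191, 26718, 7393, 3432, 16371, 11898, 59150, 63111, 50204, 54677, 41258, 45219, 33336, 37809, 27462, 31439, 18516, 23005, 11618, 15595, 3696, 8185, 63375, 58886, 54429, 50452, 45483, 40994, 37561, 33584, 31687, 27214, 22741, 18780, 15843, 11370, 7921, 3960]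

-- the table indices x & 0xFF and (x >> 8) & 0xFF are always in range 0..255, so Python's
-- in-range list indexing is PySem.List.pyGetD (the default 0 is never used)
def redundancy_bits_alt (x : Int) : Int :=
  PySem.Int.bxor (PySem.Int.bxor 0x79B4 (PySem.List.pyGetD tblLo (PySem.Int.band x 0xFF) 0))
    (PySem.List.pyGetD tblHi (PySem.Int.band (x >>> (8 : Nat)) 0xFF) 0)

-- ===== PRECONDITION & SPEC =====
def Spec_redundancy_bits (x : Int) (out : Int) : Prop := out = redundancy_bits_alt x
instance (x : Int) (out : Int) : Decidable (Spec_redundancy_bits x out) := by unfold Spec_redundancy_bits; infer_instance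

-- ===== CLAIM (what is proved, stated in full; the proofs are below) =====
def Claim_equal_redundancy_bits : Prop := ∀ (x : Int), Dom_redundancy_bits x → Spec_redundancy_bits x (redundancy_bits x)

-- ===== LEMMAS AND PROOFS =====

theorem bxor_nonneg_of_nonneg {a b : Int} (ha : 0 ≤ a) (hb : 0 ≤ b) :
    0 ≤ PySem.Int.bxor a b := by
  rw [PySem.Int.bxor_of_nonneg ha hb]; exact Int.natCast_nonneg _

theorem bxor_assoc_of_nonneg {a b c : Int} (ha : 0 ≤ a) (hb : 0 ≤ b) (hc : 0 ≤ c) :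
    PySem.Int.bxor (PySem.Int.bxor a b) c = PySem.Int.bxor a (PySem.Int.bxor b c) := by
  rw [PySem.Int.bxor_of_nonneg ha hb, PySem.Int.bxor_of_nonneg hb hc,
    PySem.Int.bxor_of_nonneg (Int.natCast_nonneg _) hc,
    PySem.Int.bxor_of_nonneg ha (Int.natCast_nonneg _)]
  simp [Nat.xor_assoc]

theorem bxor_zero_left (a : Int) : PySem.Int.bxor 0 a = a := by
  rw [PySem.Int.bxor_comm]; exact PySem.Int.bxor_zero a

-- the mask register stays nonnegative and the result stays nonnegative
theorem loopA_res_nonneg : ∀ (n : Nat) (r x m : Int), 0 ≤ r → 0 ≤ m →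
    0 ≤ (loopA n r x m).1 := by
  intro n
  induction n with
  | zero => intro r x m hr hm; simpa [loopA] using hr
  | succ n ih =>
    intro r x m hr hm
    have hm1 : (0:Int) ≤ m <<< (1:Nat) := by
      simp only [Int.shiftLeft_eq]; positivity
    simp only [loopA]
    apply ih
    · split_ifs with h
      · exact bxor_nonneg_of_nonneg hr hm
      · exact hr
    · split_ifs with h
      · exact bxor_nonneg_of_nonneg hm1 (by norm_num)
      · exact hm1

-- the x component after n steps is x >>> n
theorem loopA_x : ∀ (n : Nat) (r x m : Int), (loopA n r x m).2.1 = x >>> n := by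
  intro n
  induction n with
  | zero => intro r x m; simp [loopA]
  | succ n ih =>
    intro r x m
    simp only [loopA]
    rw [ih]
    rw [show n + 1 = 1 + n from by omega, Int.shiftRight_add]

-- the mask component does not depend on r or x
theorem loopA_mask : ∀ (n : Nat) (r x y m : Int),
    (loopA n r x m).2.2 = (loopA n 0 y m).2.2 := by
  intro n
  induction n with
  | zero => intro r x y m; simp [loopA]
  | succ n ih =>
    intro r x y m
    simp only [loopA]
    exact (ih _ _ (y >>> (1:Nat)) _).trans (ih _ _ (y >>> (1:Nat)) _).symm

-- splitting the loop
theorem loopA_add : ∀ (a b : Nat) (r x m : Int),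
    loopA (a + b) r x m =
      loopA b (loopA a r x m).1 (loopA a r x m).2.1 (loopA a r x m).2.2 := by
  intro a
  induction a with
  | zero => intro b r x m; simp [loopA]
  | succ a ih =>
    intro b r x m
    rw [show a + 1 + b = (a + b) + 1 from by omega]
    simp only [loopA]
    exact ih b _ _ _

-- the result accumulator is xor-linear in its initial value
theorem loopA_linear : ∀ (n : Nat) (r x m : Int), 0 ≤ r → 0 ≤ m →
    (loopA n r x m).1 = PySem.Int.bxor r (loopA n 0 x m).1 := by
  intro n
  induction n with
  | zero => intro r x m hr hm; simp [loopA, PySem.Int.bxor_zero]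
  | succ n ih =>
    intro r x m hr hm
    have hm1 : (0:Int) ≤ m <<< (1:Nat) := by
      simp only [Int.shiftLeft_eq]; positivity
    have hmask : (0:Int) ≤ (if m <<< (1:Nat) ≥ 0x10000 then PySem.Int.bxor (m <<< (1:Nat)) 0x10811 else m <<< (1:Nat)) := by
      split_ifs with h
      · exact bxor_nonneg_of_nonneg hm1 (by norm_num)
      · exact hm1
    have ht : (0:Int) ≤ (loopA n 0 (x >>> (1:Nat)) (if m <<< (1:Nat) ≥ 0x10000 then PySem.Int.bxor (m <<< (1:Nat)) 0x10811 else m <<< (1:Nat))).1 :=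
      loopA_res_nonneg n 0 _ _ le_rfl hmask
    simp only [loopA]
    by_cases hc : PySem.Int.band x 1 ≠ 0
    · simp only [if_pos hc]
      rw [ih _ _ _ (bxor_nonneg_of_nonneg hr hm) hmask,
          ih _ _ _ (bxor_nonneg_of_nonneg (le_refl (0:Int)) hm) hmask,
          bxor_zero_left]
      exact bxor_assoc_of_nonneg hr hm ht
    · simp only [if_neg hc]
      rw [ih _ _ _ hr hmask, ih _ _ _ (le_refl (0:Int)) hmask, bxor_zero_left]

theorem halfmod (a : Int) (k : Nat) :
    (a / 2) % (2 ^ k) = (a % (2 ^ (k + 1))) / 2 := by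
  have h2 : ((2:Int) ^ (k + 1)) = 2 * 2 ^ k := by ring
  have hdd : a / 2 / 2 ^ k = a / 2 ^ (k + 1) := by
    rw [Int.ediv_ediv_of_nonneg (by norm_num : (0:Int) ≤ 2), ← h2]
  have hL : (a / 2) % 2 ^ k = a / 2 - 2 ^ k * (a / 2 ^ (k + 1)) := by
    rw [Int.emod_def, hdd]
  have hR : (a % 2 ^ (k + 1)) / 2 = a / 2 - 2 ^ k * (a / 2 ^ (k + 1)) := by
    rw [Int.emod_def]
    have e : a - 2 ^ (k + 1) * (a / 2 ^ (k + 1)) = a + (-(2 ^ k * (a / 2 ^ (k + 1)))) * 2 := by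
      rw [h2]; ring
    rw [e, Int.add_mul_ediv_right _ _ (by norm_num : (2:Int) ≠ 0)]
    ring
  rw [hL, hR]

-- the result depends only on the n low bits of x
theorem loopA_lowdep : ∀ (n : Nat) (r m a b : Int), a % (2 ^ n) = b % (2 ^ n) →
    (loopA n r a m).1 = (loopA n r b m).1 := by
  intro n
  induction n with
  | zero => intro r m a b h; simp [loopA]
  | succ n ih =>
    intro r m a b h
    have hc : a % 2 = b % 2 := by
      have d : (2:Int) ∣ 2 ^ (n + 1) := dvd_pow_self 2 (Nat.succ_ne_zero n)
      calc a % 2 = a % 2 ^ (n + 1) % 2 := (Int.emod_emod_of_dvd a d).symm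
        _ = b % 2 ^ (n + 1) % 2 := by rw [h]
        _ = b % 2 := Int.emod_emod_of_dvd b d
    have hband : PySem.Int.band a 1 = PySem.Int.band b 1 := by
      rw [PySem.Int.band_one, PySem.Int.band_one,
        PySem.Int.mod_eq_emod_of_pos (by norm_num : (0:Int) < 2),
        PySem.Int.mod_eq_emod_of_pos (by norm_num : (0:Int) < 2), hc]
    have e : ∀ c : Int, c >>> (1:Nat) = c / 2 := fun c => by
      rw [Int.shiftRight_eq_div_pow]; norm_num
    have hshift : (a >>> (1:Nat)) % 2 ^ n = (b >>> (1:Nat)) % 2 ^ n := by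
      rw [e, e, halfmod, halfmod, h]
    simp only [loopA, hband]
    exact ih _ _ _ _ hshift

theorem bandmask (a : Int) : PySem.Int.band a 255 = a % 256 := by
  have hN : ∀ n : Nat, n &&& 255 = n % 256 := fun n => by
    have h8 := Nat.and_two_pow_sub_one_eq_mod n 8
    norm_num at h8
    exact h8
  unfold PySem.Int.band
  split_ifs with h1 h2 h2
  · rw [show ((255:Int).toNat) = 255 from rfl, hN]
    omega
  · omega
  · rw [show ((255:Int).toNat) = 255 from rfl, Nat.and_comm, hN]
    omega
  · omega

set_option maxRecDepth 10000 in
theorem byte_tables : ∀ b : Fin 256,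
    (loopA 8 0 (b : Int) 0x19D8).1 = PySem.List.pyGetD tblLo (b : Int) 0 ∧
    (loopA 8 0 (b : Int) 0x1189).1 = PySem.List.pyGetD tblHi (b : Int) 0 := by
  decide

-- one byte's 8 steps compute a table lookup
theorem byte_lookup (m0 : Int) (tbl : List Int)
    (ht : ∀ b : Fin 256, (loopA 8 0 (b : Int) m0).1 = PySem.List.pyGetD tbl (b : Int) 0)
    (v : Int) (h0 : 0 ≤ v) (h1 : v < 256) :
    (loopA 8 0 v m0).1 = PySem.List.pyGetD tbl v 0 := by
  have hlt : v.toNat < 256 := by omega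
  have h2 := ht ⟨v.toNat, hlt⟩
  rwa [show (((⟨v.toNat, hlt⟩ : Fin 256) : Int)) = v by
    simp [Int.toNat_of_nonneg h0]] at h2

-- ===== VERDICT (by name: the statement is the Claim_ definition above) =====
theorem redundancy_bits_spec : Claim_equal_redundancy_bits := by
  intro x _
  unfold Spec_redundancy_bits redundancy_bits redundancy_bits_alt
  rw [show (16:Nat) = 8 + 8 from rfl, loopA_add]
  set s := loopA 8 0x79B4 x 0x19D8 with hs
  have hx : s.2.1 = x >>> (8:Nat) := loopA_x 8 _ x _
  have hm : s.2.2 = 0x1189 := (loopA_mask 8 0x79B4 x 0 0x19D8).trans (by decide)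
  have hd256 : ∀ c : Int, c % (2:Int) ^ (8:Nat) = PySem.Int.band c 0xFF % 2 ^ (8:Nat) := by
    intro c
    rw [bandmask]
    norm_num [Int.emod_emod_of_dvd]
  have hr256 : ∀ c : Int, 0 ≤ PySem.Int.band c 0xFF ∧ PySem.Int.band c 0xFF < 256 := by
    intro c
    rw [bandmask]
    exact ⟨Int.emod_nonneg c (by norm_num), Int.emod_lt_of_pos c (by norm_num)⟩
  have hlo : (loopA 8 0 x 0x19D8).1 = PySem.List.pyGetD tblLo (PySem.Int.band x 0xFF) 0 := by
    rw [loopA_lowdep 8 0 0x19D8 x (PySem.Int.band x 0xFF) (hd256 x)]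
    exact byte_lookup 0x19D8 tblLo (fun b => (byte_tables b).1) _ (hr256 x).1 (hr256 x).2
  have hhi : (loopA 8 0 (x >>> (8:Nat)) 0x1189).1 =
      PySem.List.pyGetD tblHi (PySem.Int.band (x >>> (8:Nat)) 0xFF) 0 := by
    rw [loopA_lowdep 8 0 0x1189 (x >>> (8:Nat)) (PySem.Int.band (x >>> (8:Nat)) 0xFF) (hd256 _)]
    exact byte_lookup 0x1189 tblHi (fun b => (byte_tables b).2) _ (hr256 _).1 (hr256 _).2
  have hs1 : s.1 = PySem.Int.bxor 0x79B4 (PySem.List.pyGetD tblLo (PySem.Int.band x 0xFF) 0) := by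
    rw [hs, loopA_linear 8 0x79B4 x 0x19D8 (by norm_num) (by norm_num), hlo]
  have hs1n : 0 ≤ s.1 := loopA_res_nonneg 8 0x79B4 x 0x19D8 (by norm_num) (by norm_num)
  rw [hx, hm, loopA_linear 8 s.1 (x >>> (8:Nat)) 0x1189 hs1n (by norm_num), hhi, hs1]
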